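-- pv_equiv track=rewrite | github.com/ssarunic/thestill | thestill/core/whisper_transcriber.py | _has_repeated_phrases
-- ===== SOURCE A (Python) =====
-- from typing import Dict, List, Optional
--
-- def _has_repeated_phrases(words: List[str], phrase_length: int) -> bool:
--     """Check for repeated phrases of given length"""
--     if len(words) < phrase_length * 3:
--         return False
--
--     phrase_counts: Dict[str, int] = {}
--     for i in range(len(words) - phrase_length + 1):
--         phrase = " ".join(words[i : i + phrase_length]).lower()
--         phrase_counts[phrase] = phrase_counts.get(phrase, 0) + 1
--
--     for count in phrase_counts.values():
--         if count >= 3: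
--             return True
--
--     return False
-- ===== SOURCE B (Python) =====
-- from typing import List
--
--
-- def _has_repeated_phrases(words: List[str], phrase_length: int) -> bool:
--     """Check for repeated phrases of given length (sort-then-scan)."""
--     if len(words) < phrase_length * 3:
--         return False
--
--     phrases = sorted(
--         " ".join(words[i : i + phrase_length]).lower()
--         for i in range(len(words) - phrase_length + 1)
--     )
--     for j in range(2, len(phrases)):
--         if phrases[j - 2] == phrases[j - 1] == phrases[j]:
--             return True
--     return False
-- ===== Notes on version B (the rewrite author's own statement) =====
-- stated objective: alternative
-- what changed: Replaces A's hash-map phrase counting plus a values scan by building the list of phrases, sorting it, and scanning for three equal consecutive entries (sort-then-scan duplicate detection).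
import Mathlib
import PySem

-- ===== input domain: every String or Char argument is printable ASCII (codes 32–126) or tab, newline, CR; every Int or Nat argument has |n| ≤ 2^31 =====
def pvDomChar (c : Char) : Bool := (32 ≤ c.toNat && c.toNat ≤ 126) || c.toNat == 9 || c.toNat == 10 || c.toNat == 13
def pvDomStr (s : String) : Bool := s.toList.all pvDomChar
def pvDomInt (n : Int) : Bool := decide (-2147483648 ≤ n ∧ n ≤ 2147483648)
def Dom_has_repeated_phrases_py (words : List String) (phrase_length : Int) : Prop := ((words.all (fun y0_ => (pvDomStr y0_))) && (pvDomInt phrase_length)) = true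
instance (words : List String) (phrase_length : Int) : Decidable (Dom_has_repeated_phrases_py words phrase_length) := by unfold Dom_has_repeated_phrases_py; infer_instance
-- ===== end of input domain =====

-- B replaces A's hash-map phrase counting by sort-then-scan of adjacent triples (alternative algorithm, same results).

-- ===== PORT A =====
-- phrase = " ".join(words[i : i + phrase_length]).lower()
def pvPhrase (words : List String) (phrase_length : Int) (i : Int) : String :=
  PySem.Str.lower (PySem.Str.join " " (PySem.List.slice words (some i) (some (i + phrase_length))))

def has_repeated_phrases_py (words : List String) (phrase_length : Int) : Bool :=
  if (words.length : Int) < phrase_length * 3 then false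
  else
    -- phrase_counts: dict built by get(phrase, 0) + 1 over range(len(words) - phrase_length + 1)
    let phrase_counts : PySem.Dict String Int :=
      (PySem.List.pyRange 0 ((words.length : Int) - phrase_length + 1) 1).foldl
        (fun d i =>
          let phrase := pvPhrase words phrase_length i
          d.insert phrase (d.getD phrase 0 + 1))
        PySem.Dict.empty
    -- for count in phrase_counts.values(): if count >= 3: return True;  return False
    phrase_counts.values.any (fun count => 3 ≤ count)

-- ===== PORT B =====
-- the scan over j in range(2, len(phrases)) comparing phrases[j-2], phrases[j-1], phrases[j]:
-- walk the sorted list looking at each window of three adjacent elements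
def pvTripleScan : List String → Bool
  | a :: b :: c :: t => (a == b && b == c) || pvTripleScan (b :: c :: t)
  | _ => false

def has_repeated_phrases_py_alt (words : List String) (phrase_length : Int) : Bool :=
  if (words.length : Int) < phrase_length * 3 then false
  else
    -- sorted(...) ported as mergeSort by ≤ (a sort of the values themselves: ties are
    -- identical strings, so the sorted list is the same one Python's sorted returns)
    let phrases :=
      ((PySem.List.pyRange 0 ((words.length : Int) - phrase_length + 1) 1).map
          (fun i => pvPhrase words phrase_length i)).mergeSort (fun a b => a ≤ b)
    pvTripleScan phrases

-- ===== PRECONDITION & SPEC =====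
def Spec_has_repeated_phrases_py (words : List String) (phrase_length : Int) (out : Bool) : Prop := out = has_repeated_phrases_py_alt words phrase_length
instance (words : List String) (phrase_length : Int) (out : Bool) : Decidable (Spec_has_repeated_phrases_py words phrase_length out) := by unfold Spec_has_repeated_phrases_py; infer_instance

-- ===== CLAIM (what is proved, stated in full; the proofs are below) =====
def Claim_equal_has_repeated_phrases_py : Prop := ∀ (words : List String) (phrase_length : Int), Dom_has_repeated_phrases_py words phrase_length → Spec_has_repeated_phrases_py words phrase_length (has_repeated_phrases_py words phrase_length)

-- ===== LEMMAS AND PROOFS =====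

-- A's value-scan over the counter says: some phrase occurs at least 3 times.
lemma a_side (L : List String) :
    ((PySem.Dict.counter L).values.any (fun count => 3 ≤ count) = true) ↔ ∃ x, 3 ≤ L.count x := by
  constructor
  · rintro h
    rcases List.any_eq_true.mp h with ⟨c, hc, h3⟩
    have : c ∈ (PySem.Dict.counter L).items.map (·.2) := hc
    rw [PySem.Dict.items_counter] at this
    simp only [List.map_map, List.mem_map] at this
    rcases this with ⟨k, _, hk⟩
    refine ⟨k, ?_⟩
    have h3' : (3 : Int) ≤ (L.count k : Int) := by
      simpa [← hk] using of_decide_eq_true h3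
    exact_mod_cast h3'
  · rintro ⟨x, hx⟩
    apply List.any_eq_true.mpr
    refine ⟨(L.count x : Int), ?_, by simpa using hx⟩
    show _ ∈ (PySem.Dict.counter L).items.map (·.2)
    rw [PySem.Dict.items_counter]
    simp only [List.map_map, List.mem_map]
    refine ⟨x, ?_, rfl⟩
    have hmem : x ∈ L := List.count_pos_iff.mp (by omega)
    simpa [PySem.Set.mem_ofList] using hmem

-- On a ≤-sorted list, a run of three equal adjacent elements exists iff some element has count ≥ 3.
lemma head_eq_of_mem_sorted {a b : String} {l : List String} (hp : (b :: l).Pairwise (· ≤ ·))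
    (hm : a ∈ b :: l) (hab : a ≤ b) : a = b := by
  rcases List.mem_cons.mp hm with h | h
  · exact h
  · exact le_antisymm hab ((List.pairwise_cons.mp hp).1 a h)

lemma triple_iff_count (S : List String) (hp : S.Pairwise (· ≤ ·)) :
    pvTripleScan S = true ↔ ∃ x, 3 ≤ S.count x := by
  induction S with
  | nil => simp [pvTripleScan]
  | cons a T ih =>
    match T, hp with
    | [], _ =>
      constructor
      · intro h; simp [pvTripleScan] at h
      · rintro ⟨x, hx⟩
        have h1 : List.count x [a] ≤ 1 := by
          simpa using List.count_le_length (l := [a]) (a := x)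
        omega
    | [b], _ =>
      constructor
      · intro h; simp [pvTripleScan] at h
      · rintro ⟨x, hx⟩
        have h1 : List.count x [a, b] ≤ 2 := by
          simpa using List.count_le_length (l := [a, b]) (a := x)
        omega
    | b :: c :: t, hp =>
      obtain ⟨h1, hp'⟩ := List.pairwise_cons.mp hp
      obtain ⟨h2, hp''⟩ := List.pairwise_cons.mp hp'
      obtain ⟨h3, _⟩ := List.pairwise_cons.mp hp''
      have hab : a ≤ b := h1 b (by simp)
      have hac : a ≤ c := h1 c (by simp)
      by_cases htr : a = b ∧ b = c
      · constructor
        · intro _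
          refine ⟨a, ?_⟩
          have e1 : List.count a (a :: b :: c :: t)
              = List.count a (b :: c :: t) + 1 := by simp [List.count_cons]
          have e2 : List.count a (b :: c :: t)
              = List.count a (c :: t) + 1 := by simp [List.count_cons, htr.1]
          have e3 : List.count a (c :: t)
              = List.count a t + 1 := by simp [htr.1.trans htr.2]
          omega
        · intro _; simp [pvTripleScan, htr.1, htr.2]
      · -- no triple at the head: the head a contributes no count that reaches 3
        have hstep : pvTripleScan (a :: b :: c :: t) = pvTripleScan (b :: c :: t) := by
          have hhd : (a == b && b == c) = false := by
            simp only [Bool.and_eq_false_iff, beq_eq_false_iff_ne, ne_eq]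
            by_cases h1' : a = b
            · exact Or.inr (fun h2' => htr ⟨h1', h2'⟩)
            · exact Or.inl h1'
          simp [pvTripleScan, hhd]
        have hhead : ∀ x, 3 ≤ List.count x (a :: b :: c :: t) →
            3 ≤ List.count x (b :: c :: t) := by
          intro x hx
          by_cases hxa : x = a
          · exfalso
            rw [hxa] at hx
            by_cases hab2 : a = b
            · by_cases hac2 : a = c
              · exact htr ⟨hab2, hab2 ▸ hac2⟩
              · have hnt : List.count a t = 0 := by
                  refine List.count_eq_zero.mpr (fun hm => hac2 ?_)
                  exact le_antisymm hac (h3 a hm)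
                have e1 : List.count a (a :: b :: c :: t)
                    = List.count a (b :: c :: t) + 1 := by simp [List.count_cons]
                have e2 : List.count a (b :: c :: t)
                    = List.count a (c :: t) + 1 := by simp [List.count_cons, hab2]
                have e3 : List.count a (c :: t) = List.count a t := by
                  simp [List.count_cons]
                  exact fun h => hac2 h.symm
                omega
            · have hnm : List.count a (b :: c :: t) = 0 := by
                refine List.count_eq_zero.mpr (fun hm => hab2 ?_)
                exact head_eq_of_mem_sorted hp' hm hab
              have : List.count a (a :: b :: c :: t)
                  = List.count a (b :: c :: t) + 1 := by simp [List.count_cons]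
              omega
          · have : List.count x (a :: b :: c :: t)
                = List.count x (b :: c :: t) := by
              simp [List.count_cons]
              exact fun h => hxa h.symm
            omega
        have htail : ∀ x, 3 ≤ List.count x (b :: c :: t) →
            3 ≤ List.count x (a :: b :: c :: t) := by
          intro x hx
          have e : List.count x (a :: b :: c :: t)
              = List.count x (b :: c :: t) + if a = x then 1 else 0 := by
            simp [List.count_cons]
          rw [e]
          split_ifs <;> omega
        rw [hstep, ih hp']
        constructor
        · rintro ⟨x, hx⟩; exact ⟨x, htail x hx⟩
        · rintro ⟨x, hx⟩; exact ⟨x, hhead x hx⟩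

-- ===== VERDICT (by name: the statement is the Claim_ definition above) =====
theorem has_repeated_phrases_py_spec : Claim_equal_has_repeated_phrases_py := by
  intro words phrase_length _
  show has_repeated_phrases_py words phrase_length = has_repeated_phrases_py_alt words phrase_length
  unfold has_repeated_phrases_py has_repeated_phrases_py_alt
  split_ifs with hg
  · rfl
  · set L := (PySem.List.pyRange 0 ((words.length : Int) - phrase_length + 1) 1).map
      (fun i => pvPhrase words phrase_length i) with hL
    have hfold :
        (PySem.List.pyRange 0 ((words.length : Int) - phrase_length + 1) 1).foldl
          (fun d i =>
            let phrase := pvPhrase words phrase_length i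
            d.insert phrase (d.getD phrase 0 + 1)) PySem.Dict.empty
          = PySem.Dict.counter L := by
      rw [hL, ← PySem.Dict.foldl_insert_getD_add_one_eq_counter, List.foldl_map]
    rw [hfold]
    have hperm : (L.mergeSort (fun a b => a ≤ b)).Perm L := List.mergeSort_perm L _
    have hpw : (L.mergeSort (fun a b => a ≤ b)).Pairwise (· ≤ ·) := by
      have h := List.pairwise_mergeSort (le := fun a b : String => decide (a ≤ b)) (l := L)
        (fun a b c => by simpa using le_trans) (fun a b => by simpa using le_total a b)
      exact h.imp (by simp)
    rw [Bool.eq_iff_iff, a_side L, triple_iff_count _ hpw]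
    constructor <;> rintro ⟨x, hx⟩ <;> exact ⟨x, by rw [hperm.count_eq] at *; omega⟩
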